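-- pv_equiv track=rewrite | github.com/darioPM2002/trabajosProg | python/retos/reto1_compu1/reto1_prog2.py | sumaFilas
-- ===== SOURCE A (Python) =====
-- def sumaFilas(matriz):
--     ultimaFila=[]
--     segundaFila=[]
--     primerFila =[]
--
--     for x in range(len(matriz)):
--
--       if x == 0:
--           primerFila=matriz[x]
--
--       elif x == 1:
--           segundaFila=matriz[x]
--
--       elif x == 2:
--           ultimaFila=matriz[x]
--
--     return [sum(primerFila), sum(segundaFila),sum(ultimaFila)]
-- ===== SOURCE B (Python) =====
-- def sumaFilas(matriz):
--     filas = [sum(fila) for fila in matriz[:3]]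
--     return filas + [0] * (3 - len(filas))
-- ===== Notes on version B (the rewrite author's own statement) =====
-- stated objective: simpler
-- what changed: Replaces A's scan over every row index with three accumulator variables and index-branching by slicing the first three rows, mapping sum over them, and padding with zeros to length 3.
import Mathlib
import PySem

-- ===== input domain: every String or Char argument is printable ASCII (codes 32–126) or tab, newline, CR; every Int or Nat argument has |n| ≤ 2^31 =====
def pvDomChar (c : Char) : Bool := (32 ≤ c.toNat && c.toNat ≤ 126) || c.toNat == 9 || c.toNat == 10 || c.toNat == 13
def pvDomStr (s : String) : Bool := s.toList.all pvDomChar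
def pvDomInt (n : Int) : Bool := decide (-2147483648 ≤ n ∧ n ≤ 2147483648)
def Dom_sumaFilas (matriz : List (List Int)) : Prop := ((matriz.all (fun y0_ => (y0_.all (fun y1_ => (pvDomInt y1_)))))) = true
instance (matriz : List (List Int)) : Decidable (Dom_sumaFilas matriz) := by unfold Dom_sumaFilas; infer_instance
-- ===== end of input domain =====

-- One-line: B slices the first three rows, maps sum, and pads with zeros, instead of A's full index scan with three accumulators (simpler).
-- ===== PORT A =====
def sumaFilasStep (matriz : List (List Int)) (acc : List Int × List Int × List Int) (x : Int) :
    List Int × List Int × List Int :=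
  if x == 0 then (PySem.List.pyGetD matriz x [], acc.2.1, acc.2.2)
  else if x == 1 then (acc.1, PySem.List.pyGetD matriz x [], acc.2.2)
  else if x == 2 then (acc.1, acc.2.1, PySem.List.pyGetD matriz x [])
  else acc

def sumaFilas (matriz : List (List Int)) : List Int :=
  let st := (PySem.List.pyRange 0 (matriz.length) 1).foldl (sumaFilasStep matriz) ([], [], [])
  [st.1.sum, st.2.1.sum, st.2.2.sum]

-- ===== PORT B =====
def sumaFilas_alt (matriz : List (List Int)) : List Int :=
  let filas := (PySem.List.slice matriz none (some 3)).map List.sum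
  filas ++ List.replicate (3 - filas.length) 0

-- ===== PRECONDITION & SPEC =====
def Spec_sumaFilas (matriz : List (List Int)) (out : List Int) : Prop := out = sumaFilas_alt matriz
instance (matriz : List (List Int)) (out : List Int) : Decidable (Spec_sumaFilas matriz out) := by unfold Spec_sumaFilas; infer_instance

-- ===== CLAIM (what is proved, stated in full; the proofs are below) =====
def Claim_equal_sumaFilas : Prop := ∀ (matriz : List (List Int)), Dom_sumaFilas matriz → Spec_sumaFilas matriz (sumaFilas matriz)

-- ===== LEMMAS AND PROOFS =====
-- Loop iterations with index ≥ 3 leave A's state unchanged.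
theorem sumaFilas_foldl_ge3 (matriz : List (List Int)) (l : List Int) (acc : List Int × List Int × List Int)
    (h : ∀ x ∈ l, 3 ≤ x) : l.foldl (sumaFilasStep matriz) acc = acc := by
  induction l generalizing acc with
  | nil => rfl
  | cons y ys ih =>
    have hy := h y List.mem_cons_self
    have : sumaFilasStep matriz acc y = acc := by
      unfold sumaFilasStep
      have h0 : ¬ (y == (0:Int)) = true := by simp; omega
      have h1 : ¬ (y == (1:Int)) = true := by simp; omega
      have h2 : ¬ (y == (2:Int)) = true := by simp; omega
      simp [h0, h1, h2]
    rw [List.foldl_cons, this]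
    exact ih _ (fun x hx => h x (List.mem_cons_of_mem _ hx))

-- ===== VERDICT (by name: the statement is the Claim_ definition above) =====
theorem sumaFilas_spec : Claim_equal_sumaFilas := by
  intro matriz _
  unfold Spec_sumaFilas sumaFilas sumaFilas_alt
  match matriz with
  | [] => decide
  | [a] =>
    simp [PySem.List.pyRange, sumaFilasStep, PySem.List.slice,
      PySem.List.clampIdx, List.range_succ, PySem.List.pyGetD,
      PySem.List.pyGet?, PySem.List.pyIdx?]
  | [a, b] =>
    simp [PySem.List.pyRange, sumaFilasStep, PySem.List.slice,
      PySem.List.clampIdx, List.range_succ, PySem.List.pyGetD,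
      PySem.List.pyGet?, PySem.List.pyIdx?]
  | a :: b :: c :: rest =>
    have hlen : ((a :: b :: c :: rest).length : Int) = (rest.length : Int) + 3 := by
      simp; omega
    rw [hlen]
    have h0 : PySem.List.pyRange 0 ((rest.length : Int) + 3) 1 =
        0 :: 1 :: 2 :: PySem.List.pyRange 3 ((rest.length : Int) + 3) 1 := by
      rw [PySem.List.pyRange_one_cons (by omega)]
      rw [PySem.List.pyRange_one_cons (by omega)]
      rw [PySem.List.pyRange_one_cons (by omega)]
      norm_num
    rw [h0]
    simp only [List.foldl_cons]
    have hstep : (PySem.List.pyRange 3 ((rest.length : Int) + 3) 1).foldl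
        (sumaFilasStep (a :: b :: c :: rest))
        (sumaFilasStep (a :: b :: c :: rest)
          (sumaFilasStep (a :: b :: c :: rest)
            (sumaFilasStep (a :: b :: c :: rest) ([], [], []) 0) 1) 2) =
        (a, b, c) := by
      rw [sumaFilas_foldl_ge3 _ _ _ (fun x hx => by
        have := PySem.List.mem_pyRange_one.mp hx
        omega)]
      simp [sumaFilasStep, PySem.List.pyGetD, PySem.List.pyGet?, PySem.List.pyIdx?,
        show (0:Int) ≤ (rest.length:Int) + 1 + 1 by omega,
        show (0:Int) ≤ (rest.length:Int) + 1 by omega,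
        show (2:Int) ≤ (rest.length:Int) + 1 + 1 by omega]
    rw [hstep]
    simp [PySem.List.slice, PySem.List.clampIdx]
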